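-- pv_equiv track=rewrite | github.com/henryshen625/Leetcode | 面试原题/Doordash/orders.py | process_orders
-- ===== SOURCE A (Python) =====
-- import heapq
--
-- def process_orders(orders):
--     if not orders:
--         return []
--
--     n = len(orders)
--     left_map = {i: i - 1 for i in range(n)}  # 记录每个元素的左邻居索引
--     right_map = {i: i + 1 for i in range(n)}  # 记录每个元素的右邻居索引
--     right_map[n - 1] = None  # 最后一个元素没有右邻居
--     left_map[0] = None  # 第一个元素没有左邻居
--
--     min_heap = []
--
--     # 辅助函数：判断一个订单是否是符合条件的
--     def is_eligible(i):
--         left = left_map[i]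
--         right = right_map[i]
--         if left is None and right is None:
--             return True  # 唯一的元素
--         if left is None:  # 第一个元素
--             return orders[i] > orders[right]
--         if right is None:  # 最后一个元素
--             return orders[i] > orders[left]
--         return orders[i] > orders[left] and orders[i] > orders[right]  # 中间的元素
--
--     # 初始化时，找出所有符合条件的订单，并加入堆
--     for i in range(n):
--         if is_eligible(i):
--             heapq.heappush(min_heap, (orders[i], i))  # 堆存储 (订单ID, 订单索引)
--
--     processed_sequence = []
--
--     while min_heap:
--         # 从堆中取出最小的符合条件的订单
--         _, idx = heapq.heappop(min_heap)
--         processed_sequence.append(orders[idx])  # 记录处理的订单ID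
--
--         # 更新左右邻居
--         left = left_map[idx]
--         right = right_map[idx]
--
--         if left is not None:  # 更新左邻居的右边关系
--             right_map[left] = right
--             if is_eligible(left):
--                 heapq.heappush(min_heap, (orders[left], left))
--
--         if right is not None:  # 更新右邻居的左边关系
--             left_map[right] = left
--             if is_eligible(right):
--                 heapq.heappush(min_heap, (orders[right], right))
--
--     return processed_sequence
-- ===== SOURCE B (Python) =====
-- def process_orders(orders):
--     living = list(range(len(orders)))
--     result = []
--     while living:
--         best = None
--         for k, i in enumerate(living):
--             left_ok = k == 0 or orders[living[k-1]] < orders[i]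
--             right_ok = k == len(living) - 1 or orders[living[k+1]] < orders[i]
--             if left_ok and right_ok:
--                 if best is None or (orders[i], i) < (orders[best], best):
--                     best = i
--         if best is None:
--             break
--         result.append(orders[best])
--         living.remove(best)
--     return result
-- ===== Notes on version B (the rewrite author's own statement) =====
-- stated objective: simpler
-- what changed: Replaces the min-heap plus left/right neighbour index maps by a plain living-index list that is rescanned each round for the smallest (value, index) strict local maximum, which is then removed.
import Mathlib
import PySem

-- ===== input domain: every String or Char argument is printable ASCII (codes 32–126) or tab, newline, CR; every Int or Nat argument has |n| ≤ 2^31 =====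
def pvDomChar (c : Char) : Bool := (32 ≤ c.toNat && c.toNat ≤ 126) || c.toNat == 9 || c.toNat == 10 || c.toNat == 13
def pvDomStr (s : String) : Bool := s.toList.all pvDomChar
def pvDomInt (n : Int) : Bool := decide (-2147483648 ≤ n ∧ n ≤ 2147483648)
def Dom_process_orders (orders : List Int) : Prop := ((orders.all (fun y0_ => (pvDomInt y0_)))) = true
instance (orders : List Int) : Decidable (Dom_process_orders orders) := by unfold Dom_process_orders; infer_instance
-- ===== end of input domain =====

-- B is a simpler re-implementation: repeated linear scans over a "living" index list replace
-- the min-heap plus left/right neighbour dicts; same return value on every input.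

-- orders[i]; every access in either program is at an index in range, so the default is never used
def pvGet (orders : List Int) (i : Int) : Int := PySem.List.pyGetD orders i 0

-- Python's '<' on int pairs (lexicographic); used by heapq's tuple comparison in A and by B's tuple compare
def pairLt (p q : Int × Int) : Bool := p.1 < q.1 || (p.1 == q.1 && p.2 < q.2)

-- ===== PORT A =====
-- the shared branch body of is_eligible, reading the two neighbour lookups
def eligShape (orders : List Int) (i : Int) (l? r? : Option Int) : Bool :=
  match l?, r? with
  | none, none => true
  | none, some r => decide (pvGet orders i > pvGet orders r)
  | some l, none => decide (pvGet orders i > pvGet orders l)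
  | some l, some r => decide (pvGet orders i > pvGet orders l) && decide (pvGet orders i > pvGet orders r)

def isElig (orders : List Int) (lD rD : PySem.Dict Int (Option Int)) (i : Int) : Bool :=
  eligShape orders i (lD.getD i none) (rD.getD i none)

-- heapq modelled by contract: the heap is kept as the pairLt-ascending list,
-- heappush = ordered insert, heappop = head (exact: pops the minimum; ties impossible, indices distinct)
def hpush (h : List (Int × Int)) (p : Int × Int) : List (Int × Int) := PySem.List.insertBy pairLt p h

def aLoop (orders : List Int) :
    Nat → List (Int × Int) → PySem.Dict Int (Option Int) → PySem.Dict Int (Option Int) →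
    List Int → List Int
  | 0, _, _, _, acc => acc
  | fuel+1, heap, lD, rD, acc =>
    match heap with
    | [] => acc
    | (_, idx) :: rest =>
      let acc' := acc ++ [pvGet orders idx]
      let left := lD.getD idx none
      let right := rD.getD idx none
      let s1 : List (Int × Int) × PySem.Dict Int (Option Int) :=
        match left with
        | none => (rest, rD)
        | some l =>
          let rD' := rD.insert l right
          ((if isElig orders lD rD' l then hpush rest (pvGet orders l, l) else rest), rD')
      let s2 : List (Int × Int) × PySem.Dict Int (Option Int) :=
        match right with
        | none => (s1.1, lD)
        | some r =>
          let lD' := lD.insert r left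
          ((if isElig orders lD' s1.2 r then hpush s1.1 (pvGet orders r, r) else s1.1), lD')
      aLoop orders fuel s2.1 s2.2 s1.2 acc'

def process_orders (orders : List Int) : List Int :=
  if orders = [] then []
  else
    let n : Int := orders.length
    let lD0 := ((PySem.List.pyRange 0 n 1).foldl
      (fun d i => d.insert i (some (i - 1))) PySem.Dict.empty).insert 0 none
    let rD0 := ((PySem.List.pyRange 0 n 1).foldl
      (fun d i => d.insert i (some (i + 1))) PySem.Dict.empty).insert (n - 1) none
    let heap0 := (PySem.List.pyRange 0 n 1).foldl
      (fun h i => if isElig orders lD0 rD0 i then hpush h (pvGet orders i, i) else h) []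
    aLoop orders orders.length heap0 lD0 rD0 []

-- ===== PORT B =====
-- one scan of Source B's inner for-loop: fold over enumerate(living) keeping the best eligible index
def bestStep (orders living : List Int) (best : Option Int) (ki : Int × Int) : Option Int :=
  let k := ki.1
  let i := ki.2
  let leftOk := (k == 0) || decide (pvGet orders (PySem.List.pyGetD living (k - 1) 0) < pvGet orders i)
  let rightOk := (k == (living.length : Int) - 1) || decide (pvGet orders (PySem.List.pyGetD living (k + 1) 0) < pvGet orders i)
  if leftOk && rightOk then
    match best with
    | none => some i
    | some m => if pairLt (pvGet orders i, i) (pvGet orders m, m) then some i else best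
  else best

def bLoop (orders : List Int) : Nat → List Int → List Int → List Int
  | 0, _, acc => acc
  | fuel+1, living, acc =>
    if living = [] then acc
    else
      match (PySem.List.enumerate living 0).foldl (bestStep orders living) none with
      | none => acc
      | some b => bLoop orders fuel (living.erase b) (acc ++ [pvGet orders b])
      -- living.remove(best): best is always present, so Python's remove = erase of the first occurrence

def process_orders_alt (orders : List Int) : List Int :=
  bLoop orders orders.length (PySem.List.pyRange 0 (orders.length : Int) 1) []

-- ===== PRECONDITION & SPEC =====
def Spec_process_orders (orders : List Int) (out : List Int) : Prop := out = process_orders_alt orders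
instance (orders : List Int) (out : List Int) : Decidable (Spec_process_orders orders out) := by unfold Spec_process_orders; infer_instance

-- ===== CLAIM (what is proved, stated in full; the proofs are below) =====
def Claim_equal_process_orders : Prop := ∀ (orders : List Int), Dom_process_orders orders → Spec_process_orders orders (process_orders orders)

-- ===== LEMMAS AND PROOFS =====



theorem pairLt_self (p : Int × Int) : pairLt p p = false := by
  simp [pairLt]

theorem pairLt_trans {p q r : Int × Int} (h1 : pairLt p q = true) (h2 : pairLt q r = true) :
    pairLt p r = true := by
  simp [pairLt] at *; omega

theorem pairLt_total {p q : Int × Int} (h : p ≠ q) :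
    pairLt p q = true ∨ pairLt q p = true := by
  obtain ⟨a, b⟩ := p; obtain ⟨c, d⟩ := q
  simp [pairLt]
  by_cases hac : a = c
  · subst hac; simp at h; omega
  · omega

def SortedH (h : List (Int × Int)) : Prop := h.Pairwise (fun p q => pairLt p q = true)


theorem sortedH_hpush {h : List (Int × Int)} {x : Int × Int}
    (hs : SortedH h) (hne : ∀ q ∈ h, q ≠ x) : SortedH (hpush h x) := by
  induction h with
  | nil => simp [SortedH, hpush, PySem.List.insertBy]
  | cons y ys ih =>
    rw [SortedH, hpush, PySem.List.insertBy]
    rw [SortedH, List.pairwise_cons] at hs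
    by_cases hxy : pairLt x y = true
    · simp only [if_pos hxy]
      refine List.Pairwise.cons ?_ (List.Pairwise.cons hs.1 hs.2)
      intro z hz
      rw [List.mem_cons] at hz
      rcases hz with rfl | hz
      · exact hxy
      · exact pairLt_trans hxy (hs.1 z hz)
    · simp only [if_neg hxy]
      refine List.Pairwise.cons ?_ (ih hs.2 (fun q hq => hne q (List.mem_cons_of_mem _ hq)))
      intro z hz
      rw [PySem.List.mem_insertBy] at hz
      rcases hz with rfl | hz
      · have hxyne : z ≠ y := fun he => hne y List.mem_cons_self he.symm
        rcases pairLt_total hxyne with h1 | h1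
        · exact absurd h1 hxy
        · exact h1
      · exact hs.1 z hz


def nbL : List Int → Int → Option Int
  | [], _ => none
  | a :: t, i => if t.head? = some i then some a else nbL t i

def nbR : List Int → Int → Option Int
  | [], _ => none
  | a :: t, i => if a = i then t.head? else nbR t i

theorem nbL_not_mem {L : List Int} {i : Int} (h : i ∉ L) : nbL L i = none := by
  induction L with
  | nil => rfl
  | cons a t ih =>
    rw [nbL]
    have h1 : i ∉ t := fun hm => h (List.mem_cons_of_mem _ hm)
    rw [if_neg, ih h1]
    intro hh
    exact h1 (List.mem_of_mem_head? hh)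

theorem nbL_pos {L : List Int} (hnd : L.Nodup) {k : Nat} (hk : k < L.length) :
    nbL L (L[k]) = if k = 0 then none else L[k-1]? := by
  induction L generalizing k with
  | nil => simp at hk
  | cons a t ih =>
    rcases Nat.eq_zero_or_pos k with rfl | hkpos
    · simp only [List.getElem_cons_zero, if_pos trivial]
      rw [nbL]
      have hat : a ∉ t := (List.nodup_cons.mp hnd).1
      have hne : ¬ (t.head? = some a) := fun hh => hat (List.mem_of_mem_head? hh)
      rw [if_neg hne, nbL_not_mem hat]
    · obtain ⟨k', rfl⟩ : ∃ k', k = k' + 1 := ⟨k - 1, by omega⟩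
      have hk' : k' < t.length := by simpa using hk
      simp only [List.getElem_cons_succ, if_neg (Nat.succ_ne_zero k'), Nat.add_sub_cancel]
      rw [nbL]
      rcases Nat.eq_zero_or_pos k' with rfl | hk'pos
      · rw [List.head?_eq_getElem?, if_pos (by rw [List.getElem?_eq_getElem hk'])]
        simp
      · obtain ⟨k'', rfl⟩ : ∃ k'', k' = k'' + 1 := ⟨k' - 1, by omega⟩
        have hne : ¬ (t.head? = some (t[k'' + 1])) := by
          rw [List.head?_eq_getElem?, List.getElem?_eq_getElem (by omega : 0 < t.length)]
          intro hh
          have := ((List.nodup_cons.mp hnd).2.getElem_inj_iff).mp (Option.some.inj hh)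
          omega
        rw [if_neg hne, ih (List.nodup_cons.mp hnd).2 hk']
        rw [if_neg (by omega), List.getElem?_cons_succ]
        simp
theorem nbR_pos {L : List Int} (hnd : L.Nodup) {k : Nat} (hk : k < L.length) :
    nbR L (L[k]) = L[k+1]? := by
  induction L generalizing k with
  | nil => simp at hk
  | cons a t ih =>
    rcases Nat.eq_zero_or_pos k with rfl | hkpos
    · simp only [List.getElem_cons_zero]
      rw [nbR, if_pos rfl, List.head?_eq_getElem?]
      simp
    · obtain ⟨k', rfl⟩ : ∃ k', k = k' + 1 := ⟨k - 1, by omega⟩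
      have hk' : k' < t.length := by simpa using hk
      simp only [List.getElem_cons_succ]
      rw [nbR]
      have hat : a ∉ t := (List.nodup_cons.mp hnd).1
      rw [if_neg (fun hh : a = t[k'] => hat (by rw [hh]; exact List.getElem_mem hk')), ih (List.nodup_cons.mp hnd).2 hk']
      simp



def pickStep (orders : List Int) : Option Int → Int → Option Int
  | none, i => some i
  | some m, i => if pairLt (pvGet orders i, i) (pvGet orders m, m) then some i else some m

def pvKey (orders : List Int) (i : Int) : Int × Int := (pvGet orders i, i)

theorem pickStep_none (orders : List Int) (i : Int) : pickStep orders none i = some i := rfl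
theorem pickStep_some (orders : List Int) (m i : Int) :
    pickStep orders (some m) i =
      if pairLt (pvGet orders i, i) (pvGet orders m, m) then some i else some m := rfl

theorem pickFold_isSome {orders : List Int} (l : List Int) (a : Int) :
    (l.foldl (pickStep orders) (some a)).isSome := by
  induction l generalizing a with
  | nil => rfl
  | cons i t ih =>
    rw [List.foldl_cons]
    rcases h : pickStep orders (some a) i with _ | a'
    · rw [pickStep_some] at h; split at h <;> simp_all
    · exact ih a'

theorem pickFold_mem {orders : List Int} {l : List Int} {m : Int} {acc : Option Int}
    (h : l.foldl (pickStep orders) acc = some m) : acc = some m ∨ m ∈ l := by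
  induction l generalizing acc with
  | nil => exact Or.inl h
  | cons i t ih =>
    rw [List.foldl_cons] at h
    rcases ih h with h1 | h1
    · rcases acc with _ | a
      · rw [pickStep_none] at h1
        right; rw [Option.some.inj h1]; exact List.mem_cons_self
      · rw [pickStep_some] at h1
        by_cases hc : pairLt (pvGet orders i, i) (pvGet orders a, a) = true
        · rw [if_pos hc] at h1; right; rw [Option.some.inj h1]; exact List.mem_cons_self
        · rw [if_neg hc] at h1; exact Or.inl h1
    · exact Or.inr (List.mem_cons_of_mem _ h1)

theorem pickFold_min {orders : List Int} {l : List Int} {m : Int} :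
    ∀ {acc : Option Int}, l.foldl (pickStep orders) acc = some m →
      (∀ j ∈ l, pairLt (pvKey orders j) (pvKey orders m) = false) ∧
      (∀ a, acc = some a → pairLt (pvKey orders a) (pvKey orders m) = false) := by
  induction l with
  | nil =>
    intro acc h
    refine ⟨by simp, fun a ha => ?_⟩
    rw [ha] at h
    rw [Option.some.inj h]
    exact pairLt_self _
  | cons i t ih =>
    intro acc h
    rw [List.foldl_cons] at h
    obtain ⟨h1, h2⟩ := ih h
    have hstep : ∀ a, acc = some a → pairLt (pvKey orders a) (pvKey orders m) = false := by
      intro a ha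
      subst ha
      rw [pickStep_some] at h2
      split at h2
      · rename_i hlt
        cases hb : pairLt (pvKey orders a) (pvKey orders m)
        · rfl
        · have hi := h2 i rfl
          have : pairLt (pvKey orders i) (pvKey orders m) = true :=
            pairLt_trans (show pairLt (pvKey orders i) (pvKey orders a) = true from hlt) hb
          rw [this] at hi; exact absurd hi (by simp)
      · exact h2 a rfl
    refine ⟨?_, hstep⟩
    intro j hj
    rw [List.mem_cons] at hj
    rcases hj with rfl | hj
    · rcases acc with _ | a
      · rw [pickStep_none] at h2
        exact h2 j rfl
      · rw [pickStep_some] at h2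
        split at h2
        · exact h2 j rfl
        · rename_i hlt
          have ha := h2 a rfl
          cases hji : pairLt (pvKey orders j) (pvKey orders m)
          · rfl
          · by_cases hia : pvKey orders j = pvKey orders a
            · rw [hia] at hji; rw [hji] at ha; exact absurd ha (by simp)
            · rcases pairLt_total hia with hx | hx
              · exact absurd hx (by simpa [pvKey] using hlt)
              · have := pairLt_trans hx hji
                rw [this] at ha; exact absurd ha (by simp)
    · exact h1 j hj




def elig (orders : List Int) (L : List Int) (i : Int) : Bool :=
  eligShape orders i (nbL L i) (nbR L i)

def pick (orders L : List Int) : Option Int :=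
  (L.filter (fun i => elig orders L i)).foldl (pickStep orders) none

theorem pick_isSome {orders L : List Int}
    (hne : L.filter (fun i => elig orders L i) ≠ []) : (pick orders L).isSome := by
  rw [pick]
  rcases hf : L.filter (fun i => elig orders L i) with _ | ⟨x, t⟩
  · exact absurd hf hne
  · rw [List.foldl_cons, pickStep_none]
    exact pickFold_isSome t x

theorem pick_mem {orders L : List Int} {m : Int} (h : pick orders L = some m) :
    m ∈ L.filter (fun i => elig orders L i) := by
  rcases pickFold_mem h with h1 | h1
  · exact absurd h1 (by simp)
  · exact h1

theorem pick_eq_some {orders L : List Int} {m : Int}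
    (hm : m ∈ L.filter (fun i => elig orders L i))
    (hmin : ∀ j ∈ L.filter (fun i => elig orders L i), j ≠ m →
      pairLt (pvKey orders m) (pvKey orders j) = true) :
    pick orders L = some m := by
  have hs := pick_isSome (orders := orders) (L := L) (by intro hnil; rw [hnil] at hm; simp at hm)
  rcases ho : pick orders L with _ | m'
  · rw [ho] at hs; simp at hs
  · have hm' := pick_mem ho
    by_cases hmm : m' = m
    · rw [hmm]
    · have h1 := hmin m' hm' hmm
      have h2 := (pickFold_min ho).1 m hm
      rw [h1] at h2
      exact absurd h2 (by simp)


theorem elig_pos {orders L : List Int} (hnd : L.Nodup) {k : Nat} (hk : k < L.length) :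
    elig orders L (L[k]) =
      ((decide (k = 0) || decide (pvGet orders (L.getD (k-1) 0) < pvGet orders (L[k]))) &&
       (decide (k = L.length - 1) || decide (pvGet orders (L.getD (k+1) 0) < pvGet orders (L[k])))) := by
  rw [elig, nbL_pos hnd hk, nbR_pos hnd hk]
  by_cases hl : k + 1 = L.length
  · have hr : L[k+1]? = none := by rw [List.getElem?_eq_none]; omega
    have hd : decide (k = L.length - 1) = true := by simp; omega
    rw [hr, hd]
    by_cases h0 : k = 0
    · subst h0; rw [if_pos rfl, eligShape.eq_def]; simp
    · rw [if_neg h0, eligShape.eq_def]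
      have hm1 : k - 1 < L.length := by omega
      rw [List.getD_eq_getElem?_getD, List.getElem?_eq_getElem hm1]
      simp [h0]
  · have hp1 : k + 1 < L.length := by omega
    have hr : L[k+1]? = some (L[k+1]) := List.getElem?_eq_getElem hp1
    have hd : decide (k = L.length - 1) = false := by simp; omega
    rw [hr, hd]
    by_cases h0 : k = 0
    · subst h0
      rw [if_pos rfl, eligShape.eq_def]
      rw [List.getD_eq_getElem?_getD (l := L) (i := 0+1), List.getElem?_eq_getElem hp1]
      simp
    · rw [if_neg h0, eligShape.eq_def]
      have hm1 : k - 1 < L.length := by omega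
      rw [List.getD_eq_getElem?_getD (l := L) (i := k-1), List.getElem?_eq_getElem hm1]
      rw [List.getD_eq_getElem?_getD (l := L) (i := k+1), List.getElem?_eq_getElem hp1]
      simp only [h0, decide_false, Bool.false_or, gt_iff_lt, Option.getD_some]
      rfl

theorem bestStep_eq {orders L : List Int} (hnd : L.Nodup) (acc : Option Int)
    (p : Int × Int) (hp : p ∈ PySem.List.enumerate L 0) :
    bestStep orders L acc p = if elig orders L p.2 then pickStep orders acc p.2 else acc := by
  rw [PySem.List.mem_enumerate_iff] at hp
  obtain ⟨k, hk, rfl⟩ := hp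
  simp only [bestStep]
  simp only [zero_add]
  have hleft : (((k : Int) == 0) || decide (pvGet orders (PySem.List.pyGetD L ((k : Int) - 1) 0) < pvGet orders (L[k]))) =
      ((decide (k = 0)) || decide (pvGet orders (L.getD (k-1) 0) < pvGet orders (L[k]))) := by
    by_cases h0 : k = 0
    · subst h0; simp
    · have he : ((k : Int) - 1) = ((k - 1 : Nat) : Int) := by omega
      have h1 : (((k : Nat) : Int) == 0) = false := by
        rw [beq_eq_false_iff_ne]; omega
      have h2 : (decide (k = 0)) = false := by simp [h0]
      rw [he, PySem.List.pyGetD_natCast, h1, h2]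
  have hright : (((k : Int) == (L.length : Int) - 1) || decide (pvGet orders (PySem.List.pyGetD L ((k : Int) + 1) 0) < pvGet orders (L[k]))) =
      ((decide (k = L.length - 1)) || decide (pvGet orders (L.getD (k+1) 0) < pvGet orders (L[k]))) := by
    by_cases hl : k = L.length - 1
    · have h1 : (((k : Nat) : Int) == (L.length : Int) - 1) = true := by
        rw [beq_iff_eq]; omega
      have h2 : (decide (k = L.length - 1)) = true := by simp [hl]
      rw [h1, h2]
      simp
    · have h1 : (((k : Nat) : Int) == (L.length : Int) - 1) = false := by
        rw [beq_eq_false_iff_ne]; omega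
      have h2 : (decide (k = L.length - 1)) = false := by simp [hl]
      have he : ((k : Int) + 1) = ((k + 1 : Nat) : Int) := by omega
      rw [h1, h2, he, PySem.List.pyGetD_natCast]
  rw [hleft, hright, elig_pos hnd hk]
  rcases acc with _ | m
  · split <;> rfl
  · split <;> rfl

theorem bestFold_eq_pick {orders L : List Int} (hnd : L.Nodup) :
    (PySem.List.enumerate L 0).foldl (bestStep orders L) none = pick orders L := by
  rw [PySem.List.foldl_congr_mem _ _
      (fun acc p => if elig orders L p.2 then pickStep orders acc p.2 else acc) _
      (fun acc p hp => bestStep_eq hnd acc p hp)]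
  have h2 : (PySem.List.enumerate L 0).foldl
      (fun acc p => if elig orders L p.2 then pickStep orders acc p.2 else acc) none
      = L.foldl (fun acc i => if elig orders L i then pickStep orders acc i else acc) none := by
    rw [← PySem.List.map_snd_enumerate L 0, List.foldl_map]
    rw [PySem.List.map_snd_enumerate]
  rw [h2, PySem.List.foldl_if_eq_foldl_filter (fun i => elig orders L i) (pickStep orders)]
  rfl


def ref (orders : List Int) (L : List Int) : List Int :=
  match _h : pick orders L with
  | none => []
  | some m => pvGet orders m :: ref orders (L.erase m)
termination_by L.length
decreasing_by
  have hm : m ∈ L := (List.mem_filter.mp (pick_mem _h)).1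
  rw [List.length_erase_of_mem hm]
  exact Nat.sub_lt (List.length_pos_of_mem hm) one_pos

theorem ref_none {orders L : List Int} (h : pick orders L = none) : ref orders L = [] := by
  rw [ref.eq_def]
  split <;> simp_all

theorem ref_some {orders L : List Int} {m : Int} (h : pick orders L = some m) :
    ref orders L = pvGet orders m :: ref orders (L.erase m) := by
  rw [ref.eq_def]
  split <;> simp_all

theorem bLoop_eq (orders : List Int) :
    ∀ (fuel : Nat) (L acc : List Int), L.Nodup → L.length ≤ fuel →
      bLoop orders fuel L acc = acc ++ ref orders L := by
  intro fuel
  induction fuel with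
  | zero =>
    intro L acc hnd hlen
    have hL : L = [] := List.eq_nil_of_length_eq_zero (by omega)
    subst hL
    rw [bLoop, ref_none (by rfl), List.append_nil]
  | succ fuel ih =>
    intro L acc hnd hlen
    rw [bLoop]
    by_cases hL : L = []
    · rw [if_pos hL, hL, ref_none (by rfl), List.append_nil]
    · rw [if_neg hL, bestFold_eq_pick hnd]
      rcases hp : pick orders L with _ | b
    -- the scrutinee of the port's match is the scan result, which equals pick
      · show acc = acc ++ ref orders L
        rw [ref_none hp, List.append_nil]
      · show bLoop orders fuel (L.erase b) (acc ++ [pvGet orders b]) = acc ++ ref orders L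
        have hb : b ∈ L := (List.mem_filter.mp (pick_mem hp)).1
        rw [ih (L.erase b) _ (hnd.erase b) (by rw [List.length_erase_of_mem hb]; omega)]
        rw [ref_some hp, List.append_assoc]
        rfl

theorem eraseIdx_getElem_eq {L : List Int} {km j k : Nat} (hkm : km < L.length)
    (hk : k < L.length) (hk1 : k ≠ km)
    (hjk : (j < km ∧ j = k) ∨ (¬ j < km ∧ j + 1 = k)) (hj : j < (L.eraseIdx km).length) :
    (L.eraseIdx km)[j] = L[k] := by
  have h1 : (L.eraseIdx km)[j]? = some ((L.eraseIdx km)[j]) := List.getElem?_eq_getElem hj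
  have h2 : (L.eraseIdx km)[j]? = L[k]? := by
    rw [List.getElem?_eraseIdx]
    rcases hjk with ⟨hc, rfl⟩ | ⟨hc, hc2⟩
    · rw [if_pos hc]
    · rw [if_neg hc, hc2]
  rw [h2, List.getElem?_eq_getElem hk] at h1
  exact (Option.some.inj h1).symm

theorem nbL_eraseIdx_eq {L : List Int} (hnd : L.Nodup) {km k : Nat} (hkm : km < L.length)
    (hk : k < L.length) (h1 : k ≠ km) (h2 : k ≠ km + 1) :
    nbL (L.eraseIdx km) (L[k]) = nbL L (L[k]) := by
  have hnd' : (L.eraseIdx km).Nodup := hnd.sublist (List.eraseIdx_sublist L km)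
  have hlen : (L.eraseIdx km).length = L.length - 1 := by
    rw [List.length_eraseIdx]; simp [hkm]
  set j := if k < km then k else k - 1 with hj
  have hjd : (j < km ∧ j = k) ∨ (km ≤ j ∧ j + 1 = k) := by
    rw [hj]; split_ifs with hc
    · exact Or.inl ⟨hc, rfl⟩
    · exact Or.inr ⟨by omega, by omega⟩
  have hjlt : j < (L.eraseIdx km).length := by rw [hlen]; omega
  have hLj : (L.eraseIdx km)[j] = L[k] :=
    eraseIdx_getElem_eq hkm hk h1 (by omega) hjlt
  rw [← hLj, nbL_pos hnd' hjlt, hLj, nbL_pos hnd hk]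
  by_cases hk0 : k = 0
  · have hj0 : j = 0 := by omega
    rw [if_pos hj0, if_pos hk0]
  · have hj0 : ¬ j = 0 := by omega
    rw [if_neg hj0, if_neg hk0]
    rw [List.getElem?_eraseIdx]
    by_cases hc : j - 1 < km
    · rw [if_pos hc]
      have : j - 1 = k - 1 := by omega
      rw [this]
    · rw [if_neg hc]
      have : j - 1 + 1 = k - 1 := by omega
      rw [this]

theorem nbR_eraseIdx_eq {L : List Int} (hnd : L.Nodup) {km k : Nat} (hkm : km < L.length)
    (hk : k < L.length) (h1 : k ≠ km) (h2 : k + 1 ≠ km) :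
    nbR (L.eraseIdx km) (L[k]) = nbR L (L[k]) := by
  have hnd' : (L.eraseIdx km).Nodup := hnd.sublist (List.eraseIdx_sublist L km)
  have hlen : (L.eraseIdx km).length = L.length - 1 := by
    rw [List.length_eraseIdx]; simp [hkm]
  set j := if k < km then k else k - 1 with hj
  have hjd : (j < km ∧ j = k) ∨ (km ≤ j ∧ j + 1 = k) := by
    rw [hj]; split_ifs with hc
    · exact Or.inl ⟨hc, rfl⟩
    · exact Or.inr ⟨by omega, by omega⟩
  have hjlt : j < (L.eraseIdx km).length := by rw [hlen]; omega
  have hLj : (L.eraseIdx km)[j] = L[k] :=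
    eraseIdx_getElem_eq hkm hk h1 (by omega) hjlt
  rw [← hLj, nbR_pos hnd' hjlt, hLj]
  rw [nbR_pos hnd hk, List.getElem?_eraseIdx]
  by_cases hc : j + 1 < km
  · rw [if_pos hc]
    have : j + 1 = k + 1 := by omega
    rw [this]
  · rw [if_neg hc]
    have : j + 1 + 1 = k + 1 := by omega
    rw [this]

theorem nbL_eraseIdx_right {L : List Int} (hnd : L.Nodup) {km : Nat}
    (h : km + 1 < L.length) :
    nbL (L.eraseIdx km) (L[km+1]) = nbL L (L[km]) := by
  have hkm : km < L.length := by omega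
  have hnd' : (L.eraseIdx km).Nodup := hnd.sublist (List.eraseIdx_sublist L km)
  have hlen : (L.eraseIdx km).length = L.length - 1 := by
    rw [List.length_eraseIdx]; simp [hkm]
  have hjlt : km < (L.eraseIdx km).length := by rw [hlen]; omega
  have hLj : (L.eraseIdx km)[km] = L[km+1] :=
    eraseIdx_getElem_eq hkm h (by omega) (by omega) hjlt
  rw [← hLj, nbL_pos hnd' hjlt, nbL_pos hnd hkm]
  by_cases hk0 : km = 0
  · rw [if_pos hk0, if_pos hk0]
  · rw [if_neg hk0, if_neg hk0]
    rw [List.getElem?_eraseIdx, if_pos (by omega)]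

theorem nbR_eraseIdx_left {L : List Int} (hnd : L.Nodup) {km : Nat} (hkm : km < L.length)
    (h : 0 < km) :
    nbR (L.eraseIdx km) (L[km-1]) = nbR L (L[km]) := by
  have hnd' : (L.eraseIdx km).Nodup := hnd.sublist (List.eraseIdx_sublist L km)
  have hlen : (L.eraseIdx km).length = L.length - 1 := by
    rw [List.length_eraseIdx]; simp [hkm]
  have hjlt : km - 1 < (L.eraseIdx km).length := by rw [hlen]; omega
  have hLj : (L.eraseIdx km)[km-1] = L[km-1] :=
    eraseIdx_getElem_eq hkm (by omega) (by omega) (by omega) hjlt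
  rw [← hLj, nbR_pos hnd' hjlt, nbR_pos hnd hkm]
  rw [List.getElem?_eraseIdx, if_neg (by omega)]
  have : km - 1 + 1 + 1 = km + 1 := by omega
  rw [this]

theorem elig_eraseIdx_eq {orders L : List Int} (hnd : L.Nodup) {km k : Nat} (hkm : km < L.length)
    (hk : k < L.length) (h1 : k ≠ km) (h2 : k ≠ km + 1) (h3 : k + 1 ≠ km) :
    elig orders (L.eraseIdx km) (L[k]) = elig orders L (L[k]) := by
  rw [elig, elig, nbL_eraseIdx_eq hnd hkm hk h1 h2, nbR_eraseIdx_eq hnd hkm hk h1 h3]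

theorem eligShape_gt_left {orders : List Int} {i l : Int} {r? : Option Int}
    (h : eligShape orders i (some l) r? = true) : pvGet orders l < pvGet orders i := by
  rcases r? with _ | r <;> simp [eligShape] at h <;> omega

theorem eligShape_gt_right {orders : List Int} {i r : Int} {l? : Option Int}
    (h : eligShape orders i l? (some r) = true) : pvGet orders r < pvGet orders i := by
  rcases l? with _ | l <;> simp [eligShape] at h <;> omega

theorem right_nb_not_elig {orders L : List Int} (hnd : L.Nodup) {km : Nat}
    (hkm : km < L.length) (he : elig orders L (L[km]) = true) (h1 : km + 1 < L.length) :
    elig orders L (L[km+1]) = false := by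
  have hr : nbR L (L[km]) = some (L[km+1]) := by
    rw [nbR_pos hnd hkm, List.getElem?_eq_getElem h1]
  rw [elig, hr] at he
  have hgt := eligShape_gt_right he
  cases hE : elig orders L (L[km+1])
  · rfl
  · have hl : nbL L (L[km+1]) = some (L[km]) := by
      rw [nbL_pos hnd h1, if_neg (Nat.succ_ne_zero km), Nat.add_sub_cancel,
        List.getElem?_eq_getElem hkm]
    rw [elig, hl] at hE
    have := eligShape_gt_left hE
    omega

theorem left_nb_not_elig {orders L : List Int} (hnd : L.Nodup) {km : Nat}
    (hkm : km < L.length) (he : elig orders L (L[km]) = true) (h1 : 0 < km) :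
    elig orders L (L[km-1]) = false := by
  have hl : nbL L (L[km]) = some (L[km-1]) := by
    rw [nbL_pos hnd hkm, if_neg (by omega), List.getElem?_eq_getElem (by omega)]
  rw [elig, hl] at he
  have hgt := eligShape_gt_left he
  cases hE : elig orders L (L[km-1])
  · rfl
  · have hr : nbR L (L[km-1]) = some (L[km]) := by
      rw [nbR_pos hnd (by omega : km - 1 < L.length)]
      have : km - 1 + 1 = km := by omega
      rw [this, List.getElem?_eq_getElem hkm]
    rw [elig, hr] at hE
    have := eligShape_gt_right hE
    omega

theorem getD_foldl_insert_not_mem {f : Int → Option Int} {l : List Int}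
    {d : PySem.Dict Int (Option Int)} {j : Int} (hj : j ∉ l) :
    (l.foldl (fun d i => d.insert i (f i)) d).getD j none = d.getD j none := by
  induction l generalizing d with
  | nil => rfl
  | cons a t ih =>
    rw [List.foldl_cons, ih (fun ht => hj (List.mem_cons_of_mem _ ht))]
    exact PySem.Dict.getD_insert_of_ne d (f a) none (fun he => hj (he ▸ List.mem_cons_self))

theorem getD_foldl_insert_mem {f : Int → Option Int} {l : List Int}
    {d : PySem.Dict Int (Option Int)} {j : Int} (hj : j ∈ l) :
    (l.foldl (fun d i => d.insert i (f i)) d).getD j none = f j := by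
  induction l generalizing d with
  | nil => simp at hj
  | cons a t ih =>
    rw [List.foldl_cons]
    by_cases ht : j ∈ t
    · exact ih ht
    · have hja : j = a := by
        rcases List.mem_cons.mp hj with h | h
        · exact h
        · exact absurd h ht
      subst hja
      rw [getD_foldl_insert_not_mem ht, PySem.Dict.getD_insert_self]

theorem heapInit_spec {orders : List Int} {cond : Int → Bool} :
    ∀ (l : List Int) (h0 : List (Int × Int)) (Q : Int → Prop), l.Nodup → SortedH h0 →
      (∀ v i, (v, i) ∈ h0 ↔ (Q i ∧ v = pvGet orders i)) →
      (∀ i ∈ l, ¬ Q i) →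
      SortedH (l.foldl (fun h i => if cond i then hpush h (pvGet orders i, i) else h) h0) ∧
      (∀ v i, (v, i) ∈ l.foldl (fun h i => if cond i then hpush h (pvGet orders i, i) else h) h0 ↔
        ((Q i ∨ (i ∈ l ∧ cond i = true)) ∧ v = pvGet orders i)) := by
  intro l
  induction l with
  | nil =>
    intro h0 Q hnd hs hmem hq
    refine ⟨hs, fun v i => ?_⟩
    rw [List.foldl_nil, hmem]
    simp
  | cons a t ih =>
    intro h0 Q hnd hs hmem hq
    rw [List.foldl_cons]
    have hata : a ∉ t := (List.nodup_cons.mp hnd).1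
    have hndt : t.Nodup := (List.nodup_cons.mp hnd).2
    have hs1 : SortedH (if cond a then hpush h0 (pvGet orders a, a) else h0) := by
      split
      · refine sortedH_hpush hs ?_
        intro q hqm he
        have := (hmem q.1 q.2).mp (by rw [Prod.mk.eta]; exact hqm)
        rw [he] at this
        exact hq a List.mem_cons_self this.1
      · exact hs
    have hmem1 : ∀ v i, (v, i) ∈ (if cond a then hpush h0 (pvGet orders a, a) else h0) ↔
        ((Q i ∨ (i = a ∧ cond a = true)) ∧ v = pvGet orders i) := by
      intro v i
      split
      · rename_i hca
        rw [hpush, PySem.List.mem_insertBy, hmem]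
        constructor
        · rintro (he | ⟨hQ, hv⟩)
          · rw [Prod.mk.injEq] at he
            exact ⟨Or.inr ⟨he.2, hca⟩, by rw [he.2, he.1]⟩
          · exact ⟨Or.inl hQ, hv⟩
        · rintro ⟨hQ | ⟨rfl, _⟩, hv⟩
          · exact Or.inr ⟨hQ, hv⟩
          · exact Or.inl (by rw [hv])
      · rename_i hca
        rw [hmem]
        constructor
        · rintro ⟨hQ, hv⟩
          exact ⟨Or.inl hQ, hv⟩
        · rintro ⟨hQ | ⟨rfl, hc⟩, hv⟩
          · exact ⟨hQ, hv⟩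
          · exact absurd hc hca
    have hq1 : ∀ i ∈ t, ¬ (Q i ∨ (i = a ∧ cond a = true)) := by
      intro i hit
      rintro (hQ | ⟨rfl, _⟩)
      · exact hq i (List.mem_cons_of_mem _ hit) hQ
      · exact hata hit
    obtain ⟨hS, hM⟩ := ih _ _ hndt hs1 hmem1 hq1
    refine ⟨hS, fun v i => ?_⟩
    rw [hM]
    constructor
    · rintro ⟨(hQ | ⟨rfl, hc⟩) | ⟨hit, hc⟩, hv⟩
      · exact ⟨Or.inl hQ, hv⟩
      · exact ⟨Or.inr ⟨List.mem_cons_self, hc⟩, hv⟩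
      · exact ⟨Or.inr ⟨List.mem_cons_of_mem _ hit, hc⟩, hv⟩
    · rintro ⟨hQ | ⟨hia, hc⟩, hv⟩
      · exact ⟨Or.inl (Or.inl hQ), hv⟩
      · rcases List.mem_cons.mp hia with rfl | hit
        · exact ⟨Or.inl (Or.inr ⟨rfl, hc⟩), hv⟩
        · exact ⟨Or.inr ⟨hit, hc⟩, hv⟩

theorem getElem_idx_congr {L : List Int} {a b : Nat} (h : a = b) (ha : a < L.length) :
    L[a] = L[b]'(h ▸ ha) := by subst h; rfl

theorem push_sorted {rest : List (Int × Int)} {c : Bool} {x : Int × Int}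
    (hs : SortedH rest) (hx : ∀ q ∈ rest, q ≠ x) :
    SortedH (if c then hpush rest x else rest) := by
  split
  · exact sortedH_hpush hs hx
  · exact hs

theorem push_mem_iff {orders : List Int} {rest : List (Int × Int)} {P : Int → Prop} {c : Bool} {x : Int}
    (hrest : ∀ w j, (w, j) ∈ rest ↔ (P j ∧ w = pvGet orders j))
    (hxP : ¬ P x) :
    ∀ w j, (w, j) ∈ (if c then hpush rest (pvGet orders x, x) else rest) ↔
      ((P j ∨ (j = x ∧ c = true)) ∧ w = pvGet orders j) := by
  intro w j
  split
  · rename_i hc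
    rw [hpush, PySem.List.mem_insertBy, hrest]
    constructor
    · rintro (he | ⟨hP, hw⟩)
      · rw [Prod.mk.injEq] at he
        exact ⟨Or.inr ⟨he.2, hc⟩, by rw [he.2, he.1]⟩
      · exact ⟨Or.inl hP, hw⟩
    · rintro ⟨hP | ⟨rfl, _⟩, hw⟩
      · exact Or.inr ⟨hP, hw⟩
      · exact Or.inl (by rw [hw])
  · rename_i hc
    rw [hrest]
    constructor
    · rintro ⟨hP, hw⟩
      exact ⟨Or.inl hP, hw⟩
    · rintro ⟨hP | ⟨rfl, hcc⟩, hw⟩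
      · exact ⟨hP, hw⟩
      · exact absurd hcc hc

theorem aLoop_eq (orders : List Int) :
    ∀ (fuel : Nat) (L : List Int) (heap : List (Int × Int))
      (lD rD : PySem.Dict Int (Option Int)) (acc : List Int),
      L.Nodup →
      (∀ i ∈ L, lD.getD i none = nbL L i) →
      (∀ i ∈ L, rD.getD i none = nbR L i) →
      SortedH heap →
      (∀ v i, (v, i) ∈ heap ↔ (i ∈ L ∧ elig orders L i = true ∧ v = pvGet orders i)) →
      L.length ≤ fuel →
      aLoop orders fuel heap lD rD acc = acc ++ ref orders L := by
  intro fuel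
  induction fuel with
  | zero =>
    intro L heap lD rD acc hnd hIL hIR hS hM hlen
    have hL : L = [] := List.eq_nil_of_length_eq_zero (by omega)
    subst hL
    rw [aLoop, ref_none (by rfl), List.append_nil]
  | succ fuel ih =>
    intro L heap lD rD acc hnd hIL hIR hS hM hlen
    rcases heap with _ | ⟨⟨v, m⟩, rest⟩
    · -- empty heap: no eligible order remains, both sides stop
      rw [aLoop]
      have hfilt : L.filter (fun i => elig orders L i) = [] := by
        rw [List.filter_eq_nil_iff]
        intro j hj hejl
        exact absurd ((hM (pvGet orders j) j).mpr ⟨hj, hejl, rfl⟩) (List.not_mem_nil)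
      have hpick : pick orders L = none := by
        rw [pick, hfilt]; rfl
      rw [ref_none hpick, List.append_nil]
    · obtain ⟨hmL, he, hv⟩ := (hM v m).mp List.mem_cons_self
      obtain ⟨km, hkm, hm'⟩ := List.mem_iff_getElem.mp hmL
      subst hm'
      subst hv
      have hrestS : SortedH rest := (List.pairwise_cons.mp hS).2
      have hheadLt : ∀ q ∈ rest, pairLt (pvGet orders (L[km]), L[km]) q = true :=
        (List.pairwise_cons.mp hS).1
      have hrest : ∀ w j, (w, j) ∈ rest ↔
          (j ∈ L ∧ elig orders L j = true ∧ w = pvGet orders j ∧ j ≠ L[km]) := by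
        intro w j
        constructor
        · intro hwj
          obtain ⟨h1, h2, h3⟩ := (hM w j).mp (List.mem_cons_of_mem _ hwj)
          refine ⟨h1, h2, h3, ?_⟩
          rintro rfl
          rw [h3] at hwj
          have := hheadLt _ hwj
          rw [pairLt_self] at this
          exact absurd this (by simp)
        · rintro ⟨h1, h2, h3, h4⟩
          have := (hM w j).mpr ⟨h1, h2, h3⟩
          rcases List.mem_cons.mp this with he' | hr
          · rw [Prod.mk.injEq] at he'
            exact absurd he'.2 h4
          · exact hr
      have hpick : pick orders L = some (L[km]) := by
        apply pick_eq_some (List.mem_filter.mpr ⟨hmL, by simpa using he⟩)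
        intro j hj hjm
        obtain ⟨hjL, hje⟩ := List.mem_filter.mp hj
        have : (pvGet orders j, j) ∈ rest :=
          (hrest _ j).mpr ⟨hjL, by simpa using hje, rfl, hjm⟩
        simpa [pvKey] using hheadLt _ this
      have hL' : L.erase (L[km]) = L.eraseIdx km := by
        rw [← List.eraseIdx_idxOf_eq_erase, hnd.idxOf_getElem km hkm]
      have hnd' : (L.eraseIdx km).Nodup := hnd.sublist (List.eraseIdx_sublist L km)
      have hlen' : (L.eraseIdx km).length = L.length - 1 := by
        rw [List.length_eraseIdx]; simp [hkm]
      have hmemL' : ∀ j, j ∈ L.eraseIdx km ↔ ∃ k, ∃ (hk : k < L.length), k ≠ km ∧ L[k] = j := by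
        intro j
        rw [← hL']
        constructor
        · intro hj
          have hjL : j ∈ L := (hnd.mem_erase_iff ..).mp hj |>.2
          have hjne : j ≠ L[km] := (hnd.mem_erase_iff ..).mp hj |>.1
          obtain ⟨k, hk, hkj⟩ := List.mem_iff_getElem.mp hjL
          exact ⟨k, hk, fun hkk => hjne (by subst hkj; simp_rw [hkk]), hkj⟩
        · rintro ⟨k, hk, hkne, rfl⟩
          rw [hnd.mem_erase_iff]
          exact ⟨fun hh => hkne (hnd.getElem_inj_iff.mp hh), List.getElem_mem hk⟩
      have hleft : lD.getD (L[km]) none = nbL L (L[km]) := hIL _ hmL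
      have hright : rD.getD (L[km]) none = nbR L (L[km]) := hIR _ hmL
      rw [ref_some hpick, hL']
      rcases hcl : lD.getD (L[km]) none with _ | l <;> rcases hcr : rD.getD (L[km]) none with _ | r
      · -- no neighbours: L was a single living order
        have hnl : nbL L (L[km]) = none := by rw [← hleft, hcl]
        have hnr : nbR L (L[km]) = none := by rw [← hright, hcr]
        have hkm0 : km = 0 := by
          by_contra h0
          rw [nbL_pos hnd hkm, if_neg h0, List.getElem?_eq_getElem (by omega)] at hnl
          exact absurd hnl (by simp)
        have hlast : km + 1 = L.length := by
          by_contra h1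
          rw [nbR_pos hnd hkm, List.getElem?_eq_getElem (by omega)] at hnr
          exact absurd hnr (by simp)
        have hL'nil : L.eraseIdx km = [] := List.eq_nil_of_length_eq_zero (by omega)
        simp only [aLoop, hcl, hcr]
        have hM' : ∀ v i, (v, i) ∈ rest ↔ (i ∈ ([] : List Int) ∧ elig orders [] i = true ∧ v = pvGet orders i) := by
          intro w j
          simp only [List.not_mem_nil, false_and, iff_false]
          intro hwj
          obtain ⟨h1, _, _, h4⟩ := (hrest w j).mp hwj
          obtain ⟨k, hk, hkj⟩ := List.mem_iff_getElem.mp h1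
          have hk0 : k = km := by omega
          exact h4 (by subst hkj; simp_rw [hk0])
        rw [ih [] rest lD rD _ List.nodup_nil (by simp) (by simp) hrestS hM' (by simp),
          hL'nil, ref_none (by rfl)]
        simp
      · -- only a right neighbour
        have hnl : nbL L (L[km]) = none := by rw [← hleft, hcl]
        have hnr : nbR L (L[km]) = some r := by rw [← hright, hcr]
        have hkm0 : km = 0 := by
          by_contra h0
          rw [nbL_pos hnd hkm, if_neg h0, List.getElem?_eq_getElem (by omega)] at hnl
          exact absurd hnl (by simp)
        have hr1 : km + 1 < L.length := by
          by_contra h1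
          rw [nbR_pos hnd hkm, List.getElem?_eq_none (by omega)] at hnr
          exact absurd hnr (by simp)
        have hrr : r = L[km+1] := by
          rw [nbR_pos hnd hkm, List.getElem?_eq_getElem hr1] at hnr
          exact (Option.some.inj hnr).symm
        have hner : elig orders L (L[km+1]) = false := right_nb_not_elig hnd hkm he hr1
        have hrmem : r ∈ L := by rw [hrr]; exact List.getElem_mem hr1
        have hrL' : L[km+1] ∈ L.eraseIdx km := (hmemL' _).mpr ⟨km+1, hr1, by omega, rfl⟩
        have hnbl_r : nbL (L.eraseIdx km) (L[km+1]) = none := by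
          rw [nbL_eraseIdx_right hnd hr1, hnl]
        have hnbr_r : nbR (L.eraseIdx km) (L[km+1]) = nbR L (L[km+1]) :=
          nbR_eraseIdx_eq hnd hkm hr1 (by omega) (by omega)
        have hcond : isElig orders (lD.insert r none) rD r = elig orders (L.eraseIdx km) r := by
          rw [isElig, PySem.Dict.getD_insert_self, hIR r hrmem, elig]
          rw [hrr, hnbl_r, hnbr_r]
        have hIL' : ∀ i ∈ L.eraseIdx km, (lD.insert r none).getD i none = nbL (L.eraseIdx km) i := by
          intro i hi
          obtain ⟨k, hk, hkne, rfl⟩ := (hmemL' i).mp hi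
          by_cases hir : L[k] = r
          · rw [hir, PySem.Dict.getD_insert_self, hrr, hnbl_r]
          · have hk1 : k ≠ km + 1 := by
              intro hh
              exact hir (by subst hh; rw [hrr])
            rw [PySem.Dict.getD_insert_of_ne _ _ _ hir, hIL _ (List.getElem_mem hk),
              nbL_eraseIdx_eq hnd hkm hk hkne hk1]
        have hIR' : ∀ i ∈ L.eraseIdx km, rD.getD i none = nbR (L.eraseIdx km) i := by
          intro i hi
          obtain ⟨k, hk, hkne, rfl⟩ := (hmemL' i).mp hi
          rw [hIR _ (List.getElem_mem hk), nbR_eraseIdx_eq hnd hkm hk hkne (by omega)]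
        have hrest' : ∀ w j, (w, j) ∈ rest ↔
            ((j ∈ L ∧ elig orders L j = true ∧ j ≠ L[km]) ∧ w = pvGet orders j) := by
          intro w j
          rw [hrest]
          tauto
        have hxP : ¬ (r ∈ L ∧ elig orders L r = true ∧ r ≠ L[km]) := by
          rintro ⟨_, hre, _⟩
          rw [hrr, hner] at hre
          exact absurd hre (by simp)
        have hqne : ∀ q ∈ rest, q ≠ (pvGet orders r, r) := by
          rintro ⟨qw, qj⟩ hq heq
          rw [Prod.mk.injEq] at heq
          obtain ⟨_, h2, _, _⟩ := (hrest qw qj).mp hq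
          rw [heq.2, hrr, hner] at h2
          exact absurd h2 (by simp)
        have hM2 := push_mem_iff (c := isElig orders (lD.insert r none) rD r) hrest' hxP
        have hS2 := push_sorted (c := isElig orders (lD.insert r none) rD r)
          (x := (pvGet orders r, r)) hrestS hqne
        have hM' : ∀ w j, (w, j) ∈ (if isElig orders (lD.insert r none) rD r = true then
              hpush rest (pvGet orders r, r) else rest) ↔
            (j ∈ L.eraseIdx km ∧ elig orders (L.eraseIdx km) j = true ∧ w = pvGet orders j) := by
          intro w j
          rw [hM2 w j]
          constructor
          · rintro ⟨⟨hjL, hje, hjm⟩ | ⟨rfl, hc⟩, hw⟩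
            · obtain ⟨k, hk, hkj⟩ := List.mem_iff_getElem.mp hjL
              have hkne : k ≠ km := by
                intro hh
                exact hjm (by subst hkj; exact getElem_idx_congr hh hk)
              have hk1 : k ≠ km + 1 := by
                intro hh
                rw [← hkj, getElem_idx_congr hh hk, hner] at hje
                exact absurd hje (by simp)
              subst hkj
              exact ⟨(hmemL' _).mpr ⟨k, hk, hkne, rfl⟩,
                by rw [elig_eraseIdx_eq hnd hkm hk hkne hk1 (by omega)]; exact hje, hw⟩
            · rw [hcond] at hc
              exact ⟨by rw [hrr]; exact hrL', by rw [hrr] at hc ⊢; exact hc, hw⟩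
          · rintro ⟨hjL', hje', hw⟩
            obtain ⟨k, hk, hkne, rfl⟩ := (hmemL' _).mp hjL'
            by_cases hk1 : k = km + 1
            · refine ⟨Or.inr ⟨by subst hk1; rw [hrr], ?_⟩, hw⟩
              rw [hcond, hrr]
              subst hk1
              exact hje'
            · refine ⟨Or.inl ⟨List.getElem_mem hk, ?_, ?_⟩, hw⟩
              · rw [← elig_eraseIdx_eq hnd hkm hk hkne hk1 (by omega)]
                exact hje'
              · intro hh
                exact hkne (hnd.getElem_inj_iff.mp hh)
        simp only [aLoop, hcl, hcr]
        rw [ih _ _ _ _ _ hnd' hIL' hIR' hS2 hM' (by omega)]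
        simp
      · -- only a left neighbour
        have hnl : nbL L (L[km]) = some l := by rw [← hleft, hcl]
        have hnr : nbR L (L[km]) = none := by rw [← hright, hcr]
        have hkm1 : 0 < km := by
          by_contra h0
          rw [nbL_pos hnd hkm, if_pos (by omega)] at hnl
          exact absurd hnl (by simp)
        have hlast : km + 1 = L.length := by
          by_contra h1
          rw [nbR_pos hnd hkm, List.getElem?_eq_getElem (by omega)] at hnr
          exact absurd hnr (by simp)
        have hll : l = L[km-1] := by
          rw [nbL_pos hnd hkm, if_neg (by omega), List.getElem?_eq_getElem (by omega)] at hnl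
          exact (Option.some.inj hnl).symm
        have hnel : elig orders L (L[km-1]) = false := left_nb_not_elig hnd hkm he hkm1
        have hlmem : l ∈ L := by rw [hll]; exact List.getElem_mem (by omega)
        have hlL' : L[km-1] ∈ L.eraseIdx km := (hmemL' _).mpr ⟨km-1, by omega, by omega, rfl⟩
        have hnbr_l : nbR (L.eraseIdx km) (L[km-1]) = none := by
          rw [nbR_eraseIdx_left hnd hkm hkm1, hnr]
        have hnbl_l : nbL (L.eraseIdx km) (L[km-1]) = nbL L (L[km-1]) :=
          nbL_eraseIdx_eq hnd hkm (by omega) (by omega) (by omega)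
        have hcond : isElig orders lD (rD.insert l none) l = elig orders (L.eraseIdx km) l := by
          rw [isElig, PySem.Dict.getD_insert_self, hIL l hlmem, elig]
          rw [hll, hnbl_l, hnbr_l]
        have hIL' : ∀ i ∈ L.eraseIdx km, lD.getD i none = nbL (L.eraseIdx km) i := by
          intro i hi
          obtain ⟨k, hk, hkne, rfl⟩ := (hmemL' i).mp hi
          rw [hIL _ (List.getElem_mem hk), nbL_eraseIdx_eq hnd hkm hk hkne (by omega)]
        have hIR' : ∀ i ∈ L.eraseIdx km, (rD.insert l none).getD i none = nbR (L.eraseIdx km) i := by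
          intro i hi
          obtain ⟨k, hk, hkne, rfl⟩ := (hmemL' i).mp hi
          by_cases hil : L[k] = l
          · rw [hil, PySem.Dict.getD_insert_self, hll, hnbr_l]
          · have hk1 : k + 1 ≠ km := by
              intro hh
              exact hil (by rw [hll]; exact getElem_idx_congr (by omega) hk)
            rw [PySem.Dict.getD_insert_of_ne _ _ _ hil, hIR _ (List.getElem_mem hk),
              nbR_eraseIdx_eq hnd hkm hk hkne hk1]
        have hrest' : ∀ w j, (w, j) ∈ rest ↔
            ((j ∈ L ∧ elig orders L j = true ∧ j ≠ L[km]) ∧ w = pvGet orders j) := by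
          intro w j
          rw [hrest]
          tauto
        have hxP : ¬ (l ∈ L ∧ elig orders L l = true ∧ l ≠ L[km]) := by
          rintro ⟨_, hle, _⟩
          rw [hll, hnel] at hle
          exact absurd hle (by simp)
        have hqne : ∀ q ∈ rest, q ≠ (pvGet orders l, l) := by
          rintro ⟨qw, qj⟩ hq heq
          rw [Prod.mk.injEq] at heq
          obtain ⟨_, h2, _, _⟩ := (hrest qw qj).mp hq
          rw [heq.2, hll, hnel] at h2
          exact absurd h2 (by simp)
        have hM2 := push_mem_iff (c := isElig orders lD (rD.insert l none) l) hrest' hxP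
        have hS2 := push_sorted (c := isElig orders lD (rD.insert l none) l)
          (x := (pvGet orders l, l)) hrestS hqne
        have hM' : ∀ w j, (w, j) ∈ (if isElig orders lD (rD.insert l none) l = true then
              hpush rest (pvGet orders l, l) else rest) ↔
            (j ∈ L.eraseIdx km ∧ elig orders (L.eraseIdx km) j = true ∧ w = pvGet orders j) := by
          intro w j
          rw [hM2 w j]
          constructor
          · rintro ⟨⟨hjL, hje, hjm⟩ | ⟨rfl, hc⟩, hw⟩
            · obtain ⟨k, hk, hkj⟩ := List.mem_iff_getElem.mp hjL
              have hkne : k ≠ km := by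
                intro hh
                exact hjm (by subst hkj; exact getElem_idx_congr hh hk)
              have hk1 : k + 1 ≠ km := by
                intro hh
                rw [← hkj, getElem_idx_congr (by omega : k = km - 1) hk, hnel] at hje
                exact absurd hje (by simp)
              subst hkj
              exact ⟨(hmemL' _).mpr ⟨k, hk, hkne, rfl⟩,
                by rw [elig_eraseIdx_eq hnd hkm hk hkne (by omega) hk1]; exact hje, hw⟩
            · rw [hcond] at hc
              exact ⟨by rw [hll]; exact hlL', by rw [hll] at hc ⊢; exact hc, hw⟩
          · rintro ⟨hjL', hje', hw⟩
            obtain ⟨k, hk, hkne, rfl⟩ := (hmemL' _).mp hjL'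
            by_cases hk1 : k = km - 1
            · refine ⟨Or.inr ⟨by rw [hll]; exact getElem_idx_congr hk1 hk, ?_⟩, hw⟩
              rw [hcond, hll]
              rw [getElem_idx_congr hk1 hk] at hje'
              exact hje'
            · refine ⟨Or.inl ⟨List.getElem_mem hk, ?_, ?_⟩, hw⟩
              · rw [← elig_eraseIdx_eq hnd hkm hk hkne (by omega) (by omega)]
                exact hje'
              · intro hh
                exact hkne (hnd.getElem_inj_iff.mp hh)
        simp only [aLoop, hcl, hcr]
        rw [ih _ _ _ _ _ hnd' hIL' hIR' hS2 hM' (by omega)]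
        simp
      · -- neighbours on both sides
        have hnl : nbL L (L[km]) = some l := by rw [← hleft, hcl]
        have hnr : nbR L (L[km]) = some r := by rw [← hright, hcr]
        have hkm1 : 0 < km := by
          by_contra h0
          rw [nbL_pos hnd hkm, if_pos (by omega)] at hnl
          exact absurd hnl (by simp)
        have hr1 : km + 1 < L.length := by
          by_contra h1
          rw [nbR_pos hnd hkm, List.getElem?_eq_none (by omega)] at hnr
          exact absurd hnr (by simp)
        have hll : l = L[km-1] := by
          rw [nbL_pos hnd hkm, if_neg (by omega), List.getElem?_eq_getElem (by omega)] at hnl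
          exact (Option.some.inj hnl).symm
        have hrr : r = L[km+1] := by
          rw [nbR_pos hnd hkm, List.getElem?_eq_getElem hr1] at hnr
          exact (Option.some.inj hnr).symm
        have hnel : elig orders L (L[km-1]) = false := left_nb_not_elig hnd hkm he hkm1
        have hner : elig orders L (L[km+1]) = false := right_nb_not_elig hnd hkm he hr1
        have hlmem : l ∈ L := by rw [hll]; exact List.getElem_mem (by omega)
        have hrmem : r ∈ L := by rw [hrr]; exact List.getElem_mem hr1
        have hlL' : L[km-1] ∈ L.eraseIdx km := (hmemL' _).mpr ⟨km-1, by omega, by omega, rfl⟩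
        have hrL' : L[km+1] ∈ L.eraseIdx km := (hmemL' _).mpr ⟨km+1, hr1, by omega, rfl⟩
        have hlr : l ≠ r := by
          rw [hll, hrr]
          intro hh
          have := hnd.getElem_inj_iff.mp hh
          omega
        have hnbr_l : nbR (L.eraseIdx km) (L[km-1]) = some r := by
          rw [nbR_eraseIdx_left hnd hkm hkm1, hnr]
        have hnbl_l : nbL (L.eraseIdx km) (L[km-1]) = nbL L (L[km-1]) :=
          nbL_eraseIdx_eq hnd hkm (by omega) (by omega) (by omega)
        have hnbl_r : nbL (L.eraseIdx km) (L[km+1]) = some l := by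
          rw [nbL_eraseIdx_right hnd hr1, hnl]
        have hnbr_r : nbR (L.eraseIdx km) (L[km+1]) = nbR L (L[km+1]) :=
          nbR_eraseIdx_eq hnd hkm hr1 (by omega) (by omega)
        have hcond1 : isElig orders lD (rD.insert l (some r)) l = elig orders (L.eraseIdx km) l := by
          rw [isElig, PySem.Dict.getD_insert_self, hIL l hlmem, elig]
          rw [hll, hnbl_l, hnbr_l]
        have hcond2 : isElig orders (lD.insert r (some l)) (rD.insert l (some r)) r =
            elig orders (L.eraseIdx km) r := by
          rw [isElig, PySem.Dict.getD_insert_self,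
            PySem.Dict.getD_insert_of_ne _ _ _ (Ne.symm hlr), hIR r hrmem, elig]
          rw [hrr, hnbl_r, hnbr_r]
        have hIL' : ∀ i ∈ L.eraseIdx km, (lD.insert r (some l)).getD i none = nbL (L.eraseIdx km) i := by
          intro i hi
          obtain ⟨k, hk, hkne, rfl⟩ := (hmemL' i).mp hi
          by_cases hir : L[k] = r
          · rw [hir, PySem.Dict.getD_insert_self, hrr, hnbl_r]
          · have hk1 : k ≠ km + 1 := by
              intro hh
              exact hir (by rw [hrr]; exact getElem_idx_congr hh hk)
            rw [PySem.Dict.getD_insert_of_ne _ _ _ hir, hIL _ (List.getElem_mem hk),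
              nbL_eraseIdx_eq hnd hkm hk hkne hk1]
        have hIR' : ∀ i ∈ L.eraseIdx km, (rD.insert l (some r)).getD i none = nbR (L.eraseIdx km) i := by
          intro i hi
          obtain ⟨k, hk, hkne, rfl⟩ := (hmemL' i).mp hi
          by_cases hil : L[k] = l
          · rw [hil, PySem.Dict.getD_insert_self, hll, hnbr_l]
          · have hk1 : k + 1 ≠ km := by
              intro hh
              exact hil (by rw [hll]; exact getElem_idx_congr (by omega) hk)
            rw [PySem.Dict.getD_insert_of_ne _ _ _ hil, hIR _ (List.getElem_mem hk),
              nbR_eraseIdx_eq hnd hkm hk hkne hk1]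
        have hrest' : ∀ w j, (w, j) ∈ rest ↔
            ((j ∈ L ∧ elig orders L j = true ∧ j ≠ L[km]) ∧ w = pvGet orders j) := by
          intro w j
          rw [hrest]
          tauto
        have hxPl : ¬ (l ∈ L ∧ elig orders L l = true ∧ l ≠ L[km]) := by
          rintro ⟨_, hle, _⟩
          rw [hll, hnel] at hle
          exact absurd hle (by simp)
        have hqnel : ∀ q ∈ rest, q ≠ (pvGet orders l, l) := by
          rintro ⟨qw, qj⟩ hq heq
          rw [Prod.mk.injEq] at heq
          obtain ⟨_, h2, _, _⟩ := (hrest qw qj).mp hq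
          rw [heq.2, hll, hnel] at h2
          exact absurd h2 (by simp)
        have hM1 := push_mem_iff (c := isElig orders lD (rD.insert l (some r)) l) hrest' hxPl
        have hS1 := push_sorted (c := isElig orders lD (rD.insert l (some r)) l)
          (x := (pvGet orders l, l)) hrestS hqnel
        have hxP1r : ¬ ((r ∈ L ∧ elig orders L r = true ∧ r ≠ L[km]) ∨
            (r = l ∧ isElig orders lD (rD.insert l (some r)) l = true)) := by
          rintro (⟨_, hre, _⟩ | ⟨hrl, _⟩)
          · rw [hrr, hner] at hre
            exact absurd hre (by simp)
          · exact hlr.symm hrl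
        have hqner : ∀ q ∈ (if isElig orders lD (rD.insert l (some r)) l = true then
            hpush rest (pvGet orders l, l) else rest), q ≠ (pvGet orders r, r) := by
          rintro ⟨qw, qj⟩ hq heq
          rw [Prod.mk.injEq] at heq
          obtain ⟨h1, _⟩ := (hM1 qw qj).mp hq
          rw [heq.2] at h1
          exact hxP1r h1
        have hM2 := push_mem_iff
          (c := isElig orders (lD.insert r (some l)) (rD.insert l (some r)) r) hM1 hxP1r
        have hS2 := push_sorted
          (c := isElig orders (lD.insert r (some l)) (rD.insert l (some r)) r)
          (x := (pvGet orders r, r)) hS1 hqner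
        have hM' : ∀ w j, (w, j) ∈ (if isElig orders (lD.insert r (some l)) (rD.insert l (some r)) r = true then
              hpush (if isElig orders lD (rD.insert l (some r)) l = true then
                hpush rest (pvGet orders l, l) else rest) (pvGet orders r, r)
              else (if isElig orders lD (rD.insert l (some r)) l = true then
                hpush rest (pvGet orders l, l) else rest)) ↔
            (j ∈ L.eraseIdx km ∧ elig orders (L.eraseIdx km) j = true ∧ w = pvGet orders j) := by
          intro w j
          rw [hM2 w j]
          constructor
          · rintro ⟨(⟨hjL, hje, hjm⟩ | ⟨rfl, hc⟩) | ⟨rfl, hc⟩, hw⟩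
            · obtain ⟨k, hk, hkj⟩ := List.mem_iff_getElem.mp hjL
              have hkne : k ≠ km := by
                intro hh
                exact hjm (by subst hkj; exact getElem_idx_congr hh hk)
              have hk1 : k ≠ km + 1 := by
                intro hh
                rw [← hkj, getElem_idx_congr hh hk, hner] at hje
                exact absurd hje (by simp)
              have hk2 : k + 1 ≠ km := by
                intro hh
                rw [← hkj, getElem_idx_congr (by omega : k = km - 1) hk, hnel] at hje
                exact absurd hje (by simp)
              subst hkj
              exact ⟨(hmemL' _).mpr ⟨k, hk, hkne, rfl⟩,
                by rw [elig_eraseIdx_eq hnd hkm hk hkne hk1 hk2]; exact hje, hw⟩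
            · rw [hcond1] at hc
              exact ⟨by rw [hll]; exact hlL', by rw [hll] at hc ⊢; exact hc, hw⟩
            · rw [hcond2] at hc
              exact ⟨by rw [hrr]; exact hrL', by rw [hrr] at hc ⊢; exact hc, hw⟩
          · rintro ⟨hjL', hje', hw⟩
            obtain ⟨k, hk, hkne, rfl⟩ := (hmemL' _).mp hjL'
            by_cases hkl : k = km - 1
            · refine ⟨Or.inl (Or.inr ⟨by rw [hll]; exact getElem_idx_congr hkl hk, ?_⟩), hw⟩
              rw [hcond1, hll]
              rw [getElem_idx_congr hkl hk] at hje'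
              exact hje'
            · by_cases hkr : k = km + 1
              · refine ⟨Or.inr ⟨by rw [hrr]; exact getElem_idx_congr hkr hk, ?_⟩, hw⟩
                rw [hcond2, hrr]
                rw [getElem_idx_congr hkr hk] at hje'
                exact hje'
              · refine ⟨Or.inl (Or.inl ⟨List.getElem_mem hk, ?_, ?_⟩), hw⟩
                · rw [← elig_eraseIdx_eq hnd hkm hk hkne hkr (by omega)]
                  exact hje'
                · intro hh
                  exact hkne (hnd.getElem_inj_iff.mp hh)
        simp only [aLoop, hcl, hcr]
        rw [ih _ _ _ _ _ hnd' hIL' hIR' hS2 hM' (by omega)]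
        simp

theorem pyRange0_getElem {n : Int} {k : Nat} (hk : k < (PySem.List.pyRange 0 n 1).length) :
    (PySem.List.pyRange 0 n 1)[k] = (k : Int) := by
  rw [PySem.List.getElem_pyRange_one]
  simp

theorem init_left {orders : List Int} :
    ∀ i ∈ PySem.List.pyRange 0 (orders.length : Int) 1,
      (((PySem.List.pyRange 0 (orders.length : Int) 1).foldl
        (fun d i => d.insert i (some (i - 1))) PySem.Dict.empty).insert 0 none).getD i none =
      nbL (PySem.List.pyRange 0 (orders.length : Int) 1) i := by
  intro i hi
  obtain ⟨k, hk, rfl⟩ := List.mem_iff_getElem.mp hi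
  have hmem : ((k : Nat) : Int) ∈ PySem.List.pyRange 0 (orders.length : Int) 1 := by
    rw [← pyRange0_getElem hk]
    exact List.getElem_mem hk
  rw [nbL_pos (PySem.List.nodup_pyRange_one 0 _) hk, pyRange0_getElem hk]
  by_cases h0 : k = 0
  · subst h0
    rw [if_pos rfl]
    exact PySem.Dict.getD_insert_self _ _ _ _
  · rw [if_neg h0, List.getElem?_eq_getElem (by omega), pyRange0_getElem (by omega)]
    rw [PySem.Dict.getD_insert_of_ne _ _ _ (by exact_mod_cast h0)]
    rw [getD_foldl_insert_mem hmem]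
    congr 1
    omega

theorem init_right {orders : List Int} :
    ∀ i ∈ PySem.List.pyRange 0 (orders.length : Int) 1,
      (((PySem.List.pyRange 0 (orders.length : Int) 1).foldl
        (fun d i => d.insert i (some (i + 1))) PySem.Dict.empty).insert ((orders.length : Int) - 1) none).getD i none =
      nbR (PySem.List.pyRange 0 (orders.length : Int) 1) i := by
  intro i hi
  obtain ⟨k, hk, rfl⟩ := List.mem_iff_getElem.mp hi
  have hlen : (PySem.List.pyRange 0 (orders.length : Int) 1).length = orders.length := by
    rw [PySem.List.length_pyRange_one]; simp
  have hmem : ((k : Nat) : Int) ∈ PySem.List.pyRange 0 (orders.length : Int) 1 := by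
    rw [← pyRange0_getElem hk]
    exact List.getElem_mem hk
  rw [nbR_pos (PySem.List.nodup_pyRange_one 0 _) hk, pyRange0_getElem hk]
  by_cases hl : k + 1 = orders.length
  · rw [List.getElem?_eq_none (by omega)]
    have he : (k : Int) = (orders.length : Int) - 1 := by omega
    rw [he]
    exact PySem.Dict.getD_insert_self _ _ _ _
  · rw [List.getElem?_eq_getElem (by omega), pyRange0_getElem (by omega)]
    have hne : ((k : Nat) : Int) ≠ (orders.length : Int) - 1 := by
      rw [hlen] at hk
      omega
    rw [PySem.Dict.getD_insert_of_ne _ _ _ hne]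
    rw [getD_foldl_insert_mem hmem]
    congr 1

theorem process_orders_spec : Claim_equal_process_orders := by
  unfold Claim_equal_process_orders
  intro orders _dom
  unfold Spec_process_orders
  by_cases horders : orders = []
  · subst horders
    rfl
  · simp only [process_orders, process_orders_alt]
    rw [if_neg horders]
    have hnd0 : (PySem.List.pyRange 0 (orders.length : Int) 1).Nodup :=
      PySem.List.nodup_pyRange_one 0 _
    have hlen0 : (PySem.List.pyRange 0 (orders.length : Int) 1).length = orders.length := by
      rw [PySem.List.length_pyRange_one]; simp
    have hcond : ∀ i ∈ PySem.List.pyRange 0 (orders.length : Int) 1,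
        isElig orders
          (((PySem.List.pyRange 0 (orders.length : Int) 1).foldl
            (fun d i => d.insert i (some (i - 1))) PySem.Dict.empty).insert 0 none)
          (((PySem.List.pyRange 0 (orders.length : Int) 1).foldl
            (fun d i => d.insert i (some (i + 1))) PySem.Dict.empty).insert ((orders.length : Int) - 1) none)
          i = elig orders (PySem.List.pyRange 0 (orders.length : Int) 1) i := by
      intro i hi
      rw [isElig, init_left i hi, init_right i hi, elig]
    obtain ⟨hS0, hM0⟩ := heapInit_spec (orders := orders)
      (cond := fun i => isElig orders
        (((PySem.List.pyRange 0 (orders.length : Int) 1).foldl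
          (fun d i => d.insert i (some (i - 1))) PySem.Dict.empty).insert 0 none)
        (((PySem.List.pyRange 0 (orders.length : Int) 1).foldl
          (fun d i => d.insert i (some (i + 1))) PySem.Dict.empty).insert ((orders.length : Int) - 1) none)
        i)
      (PySem.List.pyRange 0 (orders.length : Int) 1) [] (fun _ => False)
      hnd0 (by simp [SortedH]) (by simp) (by simp)
    have hM0' : ∀ v i, (v, i) ∈ (PySem.List.pyRange 0 (orders.length : Int) 1).foldl
        (fun h i => if isElig orders
          (((PySem.List.pyRange 0 (orders.length : Int) 1).foldl
            (fun d i => d.insert i (some (i - 1))) PySem.Dict.empty).insert 0 none)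
          (((PySem.List.pyRange 0 (orders.length : Int) 1).foldl
            (fun d i => d.insert i (some (i + 1))) PySem.Dict.empty).insert ((orders.length : Int) - 1) none)
          i = true then hpush h (pvGet orders i, i) else h) [] ↔
        (i ∈ PySem.List.pyRange 0 (orders.length : Int) 1 ∧
          elig orders (PySem.List.pyRange 0 (orders.length : Int) 1) i = true ∧
          v = pvGet orders i) := by
      intro v i
      rw [hM0 v i]
      constructor
      · rintro ⟨hf | ⟨hi, hc⟩, hv⟩
        · exact absurd hf (by simp)
        · exact ⟨hi, by rw [← hcond i hi]; exact hc, hv⟩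
      · rintro ⟨hi, hc, hv⟩
        exact ⟨Or.inr ⟨hi, by rw [hcond i hi]; exact hc⟩, hv⟩
    rw [aLoop_eq orders orders.length _ _ _ _ _ hnd0 init_left init_right hS0 hM0' (by omega)]
    rw [bLoop_eq orders orders.length _ _ hnd0 (by omega)]
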